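-- pv_equiv track=rewrite | github.com/jyxjyx1234/misc_game-chs | little bitch/解密.py | ror
-- ===== SOURCE A (Python) =====
-- def ror(val, n):
--     n %= 8  # 确保 n 在0-7之间
--     b = bin(val)
--     b = str(b)[2:]
--     while len(b) != 8:
--         b = "0" + b
--     for i in range(n):
--         b = b[1:] + b[0]
--     return int(b,2)
-- ===== SOURCE B (Python) =====
-- def ror(val, n):
--     # Closed-form bitwise rotation (left by n, matching A's b[1:]+b[0] step):
--     # no string state, no per-bit loop.
--     n %= 8
--     return ((val << n) | (val >> (8 - n))) & 0xFF
-- ===== Notes on version B (the rewrite author's own statement) =====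
-- stated objective: idiomatic
-- what changed: Replaced A's bin()-string padding and per-step string rotation loop by a single closed-form bitwise expression ((val<<n)|(val>>(8-n)))&0xFF after n%=8; Pre_ excludes val>=256 (A's padding loop diverges) and val<0, where A usually raises ValueError on int(b,2) but can accidentally return a value of the 'b'-containing rotated string when the rotation happens to re-form a valid '0b' literal.
-- outside the precondition, e.g. on ror(-1, 21): A returns 32, B returns 255; on ror(-1, 1): A raises ValueError, B returns 255; on ror(256, 1): A does not finish within the time limit, B returns 2
import Mathlib
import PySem

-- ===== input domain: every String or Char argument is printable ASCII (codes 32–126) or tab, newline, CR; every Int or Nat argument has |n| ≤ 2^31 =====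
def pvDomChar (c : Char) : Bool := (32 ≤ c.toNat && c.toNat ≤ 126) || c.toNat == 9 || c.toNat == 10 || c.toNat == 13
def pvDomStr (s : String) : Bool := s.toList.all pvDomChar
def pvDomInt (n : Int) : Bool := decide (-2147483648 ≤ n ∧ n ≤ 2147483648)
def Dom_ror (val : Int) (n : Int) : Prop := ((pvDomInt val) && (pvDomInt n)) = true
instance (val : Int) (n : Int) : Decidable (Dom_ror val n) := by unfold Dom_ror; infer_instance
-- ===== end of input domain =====

-- B replaces A's binary-string padding/rotation loop by one closed-form bitwise expression.

-- ===== PORT A =====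
-- while len(b) != 8: b = "0" + b   — Python diverges when len(b) > 8 (val ≥ 256, outside
-- Pre_); the port recurses only while len(b) < 8, which is faithful on Pre_.
-- fuel 8 suffices on Pre_ (b has 1..8 chars there); structural so the kernel can evaluate it
def rorPad : Nat → List Char → List Char
  | 0, b => b
  | k + 1, b => if b.length < 8 then rorPad k ('0' :: b) else b

def ror (val : Int) (n : Int) : Int :=
  let n := PySem.Int.mod n 8
  let b := PySem.Int.toBinChars0b val        -- b = bin(val); b = str(b)[2:]
  let b := PySem.List.slice b (some 2) none
  let b := rorPad 8 b
  -- for i in range(n): b = b[1:] + b[0]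
  let b := (PySem.List.pyRange 0 n 1).foldl
    (fun b _ => PySem.List.slice b (some 1) none ++ [PySem.List.pyGetD b 0 '0']) b
  -- int(b, 2); none = ValueError, excluded by Pre_ror
  (PySem.Int.ofCharsBase? b 2).getD 0

-- ===== PORT B =====
def ror_alt (val : Int) (n : Int) : Int :=
  let n := (PySem.Int.mod n 8).toNat
  PySem.Int.band (PySem.Int.bor (val <<< n) (val >>> (8 - n))) 255

-- ===== PRECONDITION & SPEC =====
-- Pre_ excludes val ≥ 256 (A's padding while-loop never terminates) and val < 0, where
-- A usually raises ValueError in int(b,2) (bin(-k)[2:] keeps the 'b') but can accidentally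
-- return a value when the rotation re-forms a valid '0b' literal — an artefact of A's
-- string representation, inseparable in closed form from the raising region.
def Pre_ror (val : Int) (n : Int) : Prop := 0 ≤ val ∧ val < 256
instance (val : Int) (n : Int) : Decidable (Pre_ror val n) := by unfold Pre_ror; infer_instance
def pvWitness_ror : Int × Int := (170, 3)

def Spec_ror (val : Int) (n : Int) (out : Int) : Prop := out = ror_alt val n
instance (val : Int) (n : Int) (out : Int) : Decidable (Spec_ror val n out) := by unfold Spec_ror; infer_instance

-- ===== CLAIM (what is proved, stated in full; the proofs are below) =====
def Claim_equal_ror : Prop := ∀ (val : Int) (n : Int), Dom_ror val n → Pre_ror val n → Spec_ror val n (ror val n)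

-- ===== LEMMAS AND PROOFS =====

-- Both ports read n only through m := n % 8 ∈ [0,8); check all 256 × 8 cases by kernel evaluation.
set_option maxHeartbeats 4000000 in
set_option maxRecDepth 100000 in
theorem ror_table : ∀ v < 256, ∀ m < 8, ror ((v : Nat) : Int) ((m : Nat) : Int) = ror_alt ((v : Nat) : Int) ((m : Nat) : Int) := by decide

theorem mod8_self (n : Int) : PySem.Int.mod (PySem.Int.mod n 8) 8 = PySem.Int.mod n 8 := by
  have h1 := PySem.Int.mod_nonneg n (b := 8) (by norm_num)
  have h2 := PySem.Int.mod_lt n (b := 8) (by norm_num)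
  simp only [PySem.Int.mod_eq_emod_of_pos (show (0:Int) < 8 by norm_num)] at *
  omega

theorem ror_mod (val n : Int) : ror val n = ror val (PySem.Int.mod n 8) := by
  unfold ror; rw [mod8_self]

theorem ror_alt_mod (val n : Int) : ror_alt val n = ror_alt val (PySem.Int.mod n 8) := by
  unfold ror_alt; rw [mod8_self]

-- ===== VERDICT (by name: the statement is the Claim_ definition above) =====
theorem ror_spec : Claim_equal_ror := by
  intro val n _ hpre
  unfold Spec_ror
  rw [ror_mod, ror_alt_mod]
  have h1 := PySem.Int.mod_nonneg n (b := 8) (by norm_num)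
  have h2 := PySem.Int.mod_lt n (b := 8) (by norm_num)
  obtain ⟨hv0, hv1⟩ := hpre
  have hv : val = ((val.toNat : Nat) : Int) := (Int.toNat_of_nonneg hv0).symm
  have hm : PySem.Int.mod n 8 = (((PySem.Int.mod n 8).toNat : Nat) : Int) := (Int.toNat_of_nonneg h1).symm
  rw [hv, hm]
  exact ror_table val.toNat (by omega) (PySem.Int.mod n 8).toNat (by omega)
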